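-- pv_equiv track=rewrite | github.com/ORiSa-18/Academics | 6th Sem/NLP Lab/midsem.py | replace_slangs
-- ===== SOURCE A (Python) =====
-- def replace_slangs(text):
--     slangs = {
--         "btw": "by the way",
--         "imo": "in my opinion",
--         "tbh": "to be honest"
--     }
--
--     for slang, full_form in slangs.items():
--         text = text.replace(slang, full_form)
--
--     return text
-- ===== SOURCE B (Python) =====
-- SLANG_TABLE = {"btw": "by the way", "imo": "in my opinion", "tbh": "to be honest"}
--
-- def replace_slangs(text):
--     out = []
--     i, n = 0, len(text)
--     while i < n:
--         for slang, full_form in SLANG_TABLE.items():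
--             if text.startswith(slang, i):
--                 out.append(full_form)
--                 i += len(slang)
--                 break
--         else:
--             out.append(text[i])
--             i += 1
--     return "".join(out)
-- ===== Notes on version B (the rewrite author's own statement) =====
-- stated objective: alternative
-- what changed: Replaces three sequential full-text str.replace passes by a single left-to-right scan that at each position matches one of the three slang keys against the text and emits its full form (or the current character); valid because no key occurs in or overlaps any replacement or another key.
import Mathlib
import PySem

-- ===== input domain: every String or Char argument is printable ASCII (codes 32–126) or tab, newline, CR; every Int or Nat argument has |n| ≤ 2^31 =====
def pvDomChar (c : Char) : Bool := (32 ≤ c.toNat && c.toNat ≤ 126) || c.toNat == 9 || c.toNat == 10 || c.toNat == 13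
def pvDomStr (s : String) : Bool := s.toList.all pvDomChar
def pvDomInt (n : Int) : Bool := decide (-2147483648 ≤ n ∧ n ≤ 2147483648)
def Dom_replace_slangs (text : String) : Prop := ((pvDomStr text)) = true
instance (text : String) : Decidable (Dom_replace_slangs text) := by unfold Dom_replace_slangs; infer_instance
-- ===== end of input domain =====

-- B replaces three sequential str.replace passes by one left-to-right scan with a key table (alternative decomposition, same result).


-- ===== PORT A =====
-- for slang, full_form in slangs.items(): text = text.replace(slang, full_form)
def replace_slangs (text : String) : String :=
  let t1 := PySem.Str.replace text "btw" "by the way"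
  let t2 := PySem.Str.replace t1 "imo" "in my opinion"
  PySem.Str.replace t2 "tbh" "to be honest"

-- ===== PORT B =====
-- the while loop of Source B: out accumulates chunks; i advances by the matched key's length or by 1
def scanGo (acc : List Char) : List Char → List Char
  | [] => acc
  | c :: t =>
    if ("btw".toList).isPrefixOf (c :: t) then scanGo (acc ++ "by the way".toList) (List.drop 2 t)
    else if ("imo".toList).isPrefixOf (c :: t) then scanGo (acc ++ "in my opinion".toList) (List.drop 2 t)
    else if ("tbh".toList).isPrefixOf (c :: t) then scanGo (acc ++ "to be honest".toList) (List.drop 2 t)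
    else scanGo (acc ++ [c]) t
termination_by l => l.length
decreasing_by all_goals (simp [List.length_drop]; try omega)

def replace_slangs_alt (text : String) : String :=
  String.ofList (scanGo [] text.toList)

-- ===== PRECONDITION & SPEC =====
def Spec_replace_slangs (text : String) (out : String) : Prop := out = replace_slangs_alt text
instance (text : String) (out : String) : Decidable (Spec_replace_slangs text out) := by unfold Spec_replace_slangs; infer_instance

-- ===== CLAIM (what is proved, stated in full; the proofs are below) =====
def Claim_equal_replace_slangs : Prop := ∀ (text : String), Dom_replace_slangs text → Spec_replace_slangs text (replace_slangs text)

-- ===== LEMMAS AND PROOFS =====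

theorem btwL : "btw".toList = ['b','t','w'] := rfl
theorem imoL : "imo".toList = ['i','m','o'] := rfl
theorem tbhL : "tbh".toList = ['t','b','h'] := rfl
theorem BTWL : "by the way".toList = ['b','y',' ','t','h','e',' ','w','a','y'] := rfl
theorem IMOL : "in my opinion".toList = ['i','n',' ','m','y',' ','o','p','i','n','i','o','n'] := rfl

-- simple structural model of Python's left-to-right non-overlapping str.replace
def R (old new : List Char) : List Char → List Char
  | [] => []
  | c :: t =>
    if old.isPrefixOf (c :: t) ∧ old ≠ [] then new ++ R old new (List.drop (old.length - 1) t)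
    else c :: R old new t
termination_by l => l.length
decreasing_by all_goals (simp [List.length_drop]; try omega)

theorem R_nil (old new : List Char) : R old new [] = [] := by simp [R]

theorem R_cons (old new : List Char) (c : Char) (t : List Char) :
    R old new (c :: t) =
      if old.isPrefixOf (c :: t) ∧ old ≠ [] then new ++ R old new (List.drop (old.length - 1) t)
      else c :: R old new t := by
  rw [R]

-- PySem.Chars.replace.go equals R, given enough fuel and a nonempty pattern
theorem go_eq_R (old new : List Char) (hold : old ≠ []) :
    ∀ fuel l acc, l.length ≤ fuel →
      PySem.Chars.replace.go old new fuel l acc = acc.reverse ++ R old new l := by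
  intro fuel
  induction fuel with
  | zero =>
    intro l acc h
    have : l = [] := List.eq_nil_of_length_eq_zero (Nat.le_zero.mp h)
    subst this
    simp [PySem.Chars.replace.go, R_nil]
  | succ n ih =>
    intro l acc h
    cases l with
    | nil => simp [PySem.Chars.replace.go, R_nil]
    | cons c t =>
      rw [PySem.Chars.replace.go]
      by_cases hp : old.isPrefixOf (c :: t)
      · have hlen : 1 ≤ old.length := by
          cases old with
          | nil => exact absurd rfl hold
          | cons _ _ => simp
        have hdrop : List.drop old.length (c :: t) = List.drop (old.length - 1) t := by
          cases old with
          | nil => exact absurd rfl hold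
          | cons o os => simp
        have hdl : (List.drop (old.length - 1) t).length ≤ n := by
          simp only [List.length_drop]
          simp at h
          omega
        simp only [hp, if_true]
        rw [hdrop, ih _ _ hdl, R_cons]
        simp [hp, hold]
      · simp only [hp, Bool.false_eq_true, if_false]
        have ht : t.length ≤ n := by simp at h; omega
        rw [ih _ _ ht, R_cons]
        simp [hp]

theorem replace_eq_R (l old new : List Char) (hold : old ≠ []) :
    PySem.Chars.replace l old new = R old new l := by
  rw [PySem.Chars.replace]
  have he : old.isEmpty = false := by
    cases old with | nil => exact absurd rfl hold | cons _ _ => rfl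
  rw [he]
  simp only [Bool.false_eq_true, if_false]
  simpa using go_eq_R old new hold l.length l [] le_rfl

-- the plain (accumulator-free) scan, mirroring scanGo
def scan : List Char → List Char
  | [] => []
  | c :: t =>
    if ("btw".toList).isPrefixOf (c :: t) then "by the way".toList ++ scan (List.drop 2 t)
    else if ("imo".toList).isPrefixOf (c :: t) then "in my opinion".toList ++ scan (List.drop 2 t)
    else if ("tbh".toList).isPrefixOf (c :: t) then "to be honest".toList ++ scan (List.drop 2 t)
    else c :: scan t
termination_by l => l.length
decreasing_by all_goals (simp [List.length_drop]; try omega)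

theorem scanGo_eq_scan : ∀ l acc, scanGo acc l = acc ++ scan l := by
  intro l
  induction l using scan.induct with
  | case1 => intro acc; simp [scanGo, scan]
  | case2 c t hp ih =>
    intro acc; rw [scanGo, scan]; simp only [hp, if_true]; rw [ih]; simp
  | case3 c t hp1 hp ih =>
    intro acc; rw [scanGo, scan]
    simp only [hp1, hp, if_true, Bool.false_eq_true, if_false]; rw [ih]; simp
  | case4 c t hp1 hp2 hp ih =>
    intro acc; rw [scanGo, scan]
    simp only [hp1, hp2, hp, if_true, Bool.false_eq_true, if_false]; rw [ih]; simp
  | case5 c t hp1 hp2 hp3 ih =>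
    intro acc; rw [scanGo, scan]
    simp only [hp1, hp2, hp3, Bool.false_eq_true, if_false]; rw [ih]; simp

-- abbreviations for the three passes
def R1 : List Char → List Char := R "btw".toList "by the way".toList
def R2 : List Char → List Char := R "imo".toList "in my opinion".toList
def R3 : List Char → List Char := R "tbh".toList "to be honest".toList

-- one-step equations with the condition as a prefix proposition
theorem R1_cons (c : Char) (t : List Char) :
    R1 (c :: t) = if ['b','t','w'] <+: (c :: t)
      then "by the way".toList ++ R1 (List.drop 2 t) else c :: R1 t := by
  rw [R1, R_cons]
  simp [btwL, List.isPrefixOf_iff_prefix]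

theorem R2_cons (c : Char) (t : List Char) :
    R2 (c :: t) = if ['i','m','o'] <+: (c :: t)
      then "in my opinion".toList ++ R2 (List.drop 2 t) else c :: R2 t := by
  rw [R2, R_cons]
  simp [imoL, List.isPrefixOf_iff_prefix]

theorem R3_cons (c : Char) (t : List Char) :
    R3 (c :: t) = if ['t','b','h'] <+: (c :: t)
      then "to be honest".toList ++ R3 (List.drop 2 t) else c :: R3 t := by
  rw [R3, R_cons]
  simp [tbhL, List.isPrefixOf_iff_prefix]

-- no "imo" match can start inside "by the way" (no 'i' occurs in it)
theorem R2_btw_block (x : List Char) : R2 ("by the way".toList ++ x) = "by the way".toList ++ R2 x := by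
  rw [BTWL]
  rw [show (['b','y',' ','t','h','e',' ','w','a','y'] ++ x) = 'b'::'y'::' '::'t'::'h'::'e'::' '::'w'::'a'::'y'::x by rfl]
  rw [R2_cons, if_neg (by simp [List.cons_prefix_cons]), R2_cons, if_neg (by simp [List.cons_prefix_cons]),
      R2_cons, if_neg (by simp [List.cons_prefix_cons]), R2_cons, if_neg (by simp [List.cons_prefix_cons]),
      R2_cons, if_neg (by simp [List.cons_prefix_cons]), R2_cons, if_neg (by simp [List.cons_prefix_cons]),
      R2_cons, if_neg (by simp [List.cons_prefix_cons]), R2_cons, if_neg (by simp [List.cons_prefix_cons]),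
      R2_cons, if_neg (by simp [List.cons_prefix_cons]), R2_cons, if_neg (by simp [List.cons_prefix_cons])]
  simp

-- no "tbh" match can start inside "by the way" (its 't' is followed by 'h','e')
theorem R3_btw_block (x : List Char) : R3 ("by the way".toList ++ x) = "by the way".toList ++ R3 x := by
  rw [BTWL]
  rw [show (['b','y',' ','t','h','e',' ','w','a','y'] ++ x) = 'b'::'y'::' '::'t'::'h'::'e'::' '::'w'::'a'::'y'::x by rfl]
  rw [R3_cons, if_neg (by simp [List.cons_prefix_cons]), R3_cons, if_neg (by simp [List.cons_prefix_cons]),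
      R3_cons, if_neg (by simp [List.cons_prefix_cons]), R3_cons, if_neg (by simp [List.cons_prefix_cons]),
      R3_cons, if_neg (by simp [List.cons_prefix_cons]), R3_cons, if_neg (by simp [List.cons_prefix_cons]),
      R3_cons, if_neg (by simp [List.cons_prefix_cons]), R3_cons, if_neg (by simp [List.cons_prefix_cons]),
      R3_cons, if_neg (by simp [List.cons_prefix_cons]), R3_cons, if_neg (by simp [List.cons_prefix_cons])]
  simp

-- no "tbh" match can start inside "in my opinion" (no 't' occurs in it)
theorem R3_imo_block (x : List Char) : R3 ("in my opinion".toList ++ x) = "in my opinion".toList ++ R3 x := by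
  rw [IMOL]
  rw [show (['i','n',' ','m','y',' ','o','p','i','n','i','o','n'] ++ x) = 'i'::'n'::' '::'m'::'y'::' '::'o'::'p'::'i'::'n'::'i'::'o'::'n'::x by rfl]
  rw [R3_cons, if_neg (by simp [List.cons_prefix_cons]), R3_cons, if_neg (by simp [List.cons_prefix_cons]),
      R3_cons, if_neg (by simp [List.cons_prefix_cons]), R3_cons, if_neg (by simp [List.cons_prefix_cons]),
      R3_cons, if_neg (by simp [List.cons_prefix_cons]), R3_cons, if_neg (by simp [List.cons_prefix_cons]),
      R3_cons, if_neg (by simp [List.cons_prefix_cons]), R3_cons, if_neg (by simp [List.cons_prefix_cons]),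
      R3_cons, if_neg (by simp [List.cons_prefix_cons]), R3_cons, if_neg (by simp [List.cons_prefix_cons]),
      R3_cons, if_neg (by simp [List.cons_prefix_cons]), R3_cons, if_neg (by simp [List.cons_prefix_cons]),
      R3_cons, if_neg (by simp [List.cons_prefix_cons])]
  simp

-- first-character shape of R1 r: empty, a 'b' from a replacement, or the head of r
theorem R1_shape (r : List Char) :
    R1 r = [] ∨ (∃ t, R1 r = 'b' :: t) ∨ (∃ a t' t, r = a :: t' ∧ R1 r = a :: t) := by
  cases r with
  | nil => left; rw [R1, R_nil]
  | cons a r' =>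
    rw [R1_cons]
    by_cases hp : (['b','t','w'] : List Char) <+: (a :: r')
    · right; left; rw [if_pos hp, BTWL]; exact ⟨_, rfl⟩
    · right; right; rw [if_neg hp]; exact ⟨a, r', _, rfl, rfl⟩

-- first-character shape of R2 (R1 r): empty, 'b', 'i', or the head of r
theorem g_shape (r : List Char) :
    R2 (R1 r) = [] ∨ (∃ t, R2 (R1 r) = 'b' :: t) ∨ (∃ t, R2 (R1 r) = 'i' :: t) ∨
      (∃ a t' t, r = a :: t' ∧ R2 (R1 r) = a :: t) := by
  rcases R1_shape r with h | ⟨t, h⟩ | ⟨a, t', t, hr, h⟩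
  · left; rw [h, R2, R_nil]
  · rw [h, R2_cons, if_neg (by simp [List.cons_prefix_cons])]
    right; left; exact ⟨_, rfl⟩
  · rw [h, R2_cons]
    by_cases hp : (['i','m','o'] : List Char) <+: (a :: t)
    · rw [if_pos hp, IMOL]; right; right; left; exact ⟨_, rfl⟩
    · rw [if_neg hp]; right; right; right; exact ⟨a, t', _, hr, rfl⟩

-- if r does not start with "mo", neither does R1 r
theorem no_mo_R1 (r : List Char) (h : ¬ (['m','o'] : List Char) <+: r) :
    ¬ (['m','o'] : List Char) <+: R1 r := by
  cases r with
  | nil => rw [R1, R_nil]; simp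
  | cons a r' =>
    rw [R1_cons]
    by_cases hp : (['b','t','w'] : List Char) <+: (a :: r')
    · rw [if_pos hp, BTWL]; simp [List.cons_prefix_cons]
    · rw [if_neg hp]
      by_cases ham : a = 'm'
      · subst ham
        have ho : ¬ (['o'] : List Char) <+: r' := by
          intro h2; exact h (by simpa [List.cons_prefix_cons] using h2)
        rcases R1_shape r' with h1 | ⟨t, h1⟩ | ⟨b, t', t, hr', h1⟩
        · rw [h1]; simp [List.cons_prefix_cons]
        · rw [h1]; simp [List.cons_prefix_cons]
        · rw [h1]
          have hb : b ≠ 'o' := by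
            intro he; subst he
            exact ho (by rw [hr']; simp [List.cons_prefix_cons])
          simp only [List.cons_prefix_cons]
          intro hcon
          exact hb hcon.2.1.symm
      · simp only [List.cons_prefix_cons]
        intro hcon
        exact ham hcon.1.symm

-- if r does not start with "bh", neither does R2 (R1 r)
theorem no_bh_g (r : List Char) (h : ¬ (['b','h'] : List Char) <+: r) :
    ¬ (['b','h'] : List Char) <+: R2 (R1 r) := by
  cases r with
  | nil => rw [R1, R_nil, R2, R_nil]; simp
  | cons a r' =>
    rw [R1_cons]
    by_cases hp : (['b','t','w'] : List Char) <+: (a :: r')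
    · rw [if_pos hp, R2_btw_block, BTWL]
      simp [List.cons_prefix_cons]
    · rw [if_neg hp, R2_cons]
      by_cases hq : (['i','m','o'] : List Char) <+: (a :: R1 r')
      · rw [if_pos hq, IMOL]; simp [List.cons_prefix_cons]
      · rw [if_neg hq]
        by_cases hab : a = 'b'
        · subst hab
          have hh : ¬ (['h'] : List Char) <+: r' := by
            intro h2; exact h (by simpa [List.cons_prefix_cons] using h2)
          rcases g_shape r' with h1 | ⟨t, h1⟩ | ⟨t, h1⟩ | ⟨b, t', t, hr', h1⟩
          · rw [h1]; simp [List.cons_prefix_cons]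
          · rw [h1]; simp [List.cons_prefix_cons]
          · rw [h1]; simp [List.cons_prefix_cons]
          · rw [h1]
            have hb : b ≠ 'h' := by
              intro he; subst he
              exact hh (by rw [hr']; simp [List.cons_prefix_cons])
            simp only [List.cons_prefix_cons]
            intro hcon
            exact hb hcon.2.1.symm
        · simp only [List.cons_prefix_cons]
          intro hcon
          exact hab hcon.1.symm

-- the main lemma: the three sequential passes equal the single scan
theorem three_eq_scan : ∀ l, R3 (R2 (R1 l)) = scan l := by
  intro l
  induction l using scan.induct with
  | case1 => rw [R1, R_nil, R2, R_nil, R3, R_nil, scan]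
  | case2 c t hp ih =>
    have hp' : (['b','t','w'] : List Char) <+: (c :: t) := by
      simpa [btwL, List.isPrefixOf_iff_prefix] using hp
    obtain ⟨u, hu⟩ := hp'
    have ht : ('b'::'t'::'w'::u : List Char) = c :: t := hu
    injection ht with h1 h2
    subst h1; subst h2
    rw [scan]
    simp only [hp, if_true]
    rw [R1_cons, if_pos (by simp [List.cons_prefix_cons])]
    rw [R2_btw_block, R3_btw_block]
    have ih' := ih
    simp only [List.drop_succ_cons, List.drop_zero] at ih'
    simp only [List.drop_succ_cons, List.drop_zero]
    rw [ih']
  | case3 c t hp1 hp ih =>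
    have hp' : (['i','m','o'] : List Char) <+: (c :: t) := by
      simpa [imoL, List.isPrefixOf_iff_prefix] using hp
    obtain ⟨u, hu⟩ := hp'
    have ht : ('i'::'m'::'o'::u : List Char) = c :: t := hu
    injection ht with h1 h2
    subst h1; subst h2
    rw [scan]
    simp only [hp1, hp, if_true, Bool.false_eq_true, if_false]
    rw [R1_cons, if_neg (by simp [List.cons_prefix_cons]),
        R1_cons, if_neg (by simp [List.cons_prefix_cons]),
        R1_cons, if_neg (by simp [List.cons_prefix_cons])]
    rw [R2_cons, if_pos (by simp [List.cons_prefix_cons])]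
    rw [R3_imo_block]
    have ih' := ih
    simp only [List.drop_succ_cons, List.drop_zero] at ih'
    simp only [List.drop_succ_cons, List.drop_zero]
    rw [ih']
  | case4 c t hp1 hp2 hp ih =>
    have hp' : (['t','b','h'] : List Char) <+: (c :: t) := by
      simpa [tbhL, List.isPrefixOf_iff_prefix] using hp
    obtain ⟨u, hu⟩ := hp'
    have ht : ('t'::'b'::'h'::u : List Char) = c :: t := hu
    injection ht with h1 h2
    subst h1; subst h2
    rw [scan]
    simp only [hp1, hp2, hp, if_true, Bool.false_eq_true, if_false]
    rw [R1_cons, if_neg (by simp [List.cons_prefix_cons]),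
        R1_cons, if_neg (by simp [List.cons_prefix_cons]),
        R1_cons, if_neg (by simp [List.cons_prefix_cons])]
    rw [R2_cons, if_neg (by simp [List.cons_prefix_cons]),
        R2_cons, if_neg (by simp [List.cons_prefix_cons]),
        R2_cons, if_neg (by simp [List.cons_prefix_cons])]
    rw [R3_cons, if_pos (by simp [List.cons_prefix_cons])]
    have ih' := ih
    simp only [List.drop_succ_cons, List.drop_zero] at ih'
    simp only [List.drop_succ_cons, List.drop_zero]
    rw [ih']
  | case5 c t hp1 hp2 hp3 ih =>
    rw [scan]
    simp only [hp1, hp2, hp3, Bool.false_eq_true, if_false]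
    have hq1 : ¬ (['b','t','w'] : List Char) <+: (c :: t) := by
      intro h2; apply absurd hp1; simp [btwL, List.isPrefixOf_iff_prefix, h2]
    have hq2 : ¬ (['i','m','o'] : List Char) <+: (c :: t) := by
      intro h2; apply absurd hp2; simp [imoL, List.isPrefixOf_iff_prefix, h2]
    have hq3 : ¬ (['t','b','h'] : List Char) <+: (c :: t) := by
      intro h2; apply absurd hp3; simp [tbhL, List.isPrefixOf_iff_prefix, h2]
    rw [R1_cons, if_neg hq1]
    have h2 : ¬ (['i','m','o'] : List Char) <+: (c :: R1 t) := by
      by_cases hc : c = 'i'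
      · subst hc
        have : ¬ (['m','o'] : List Char) <+: t := by
          intro hmo; exact hq2 (by simpa [List.cons_prefix_cons] using hmo)
        intro habs
        exact no_mo_R1 t this (by simpa [List.cons_prefix_cons] using habs)
      · simp only [List.cons_prefix_cons, not_and]
        intro he
        exact absurd he.symm hc
    rw [R2_cons, if_neg h2]
    have h3 : ¬ (['t','b','h'] : List Char) <+: (c :: R2 (R1 t)) := by
      by_cases hc : c = 't'
      · subst hc
        have : ¬ (['b','h'] : List Char) <+: t := by
          intro hbh; exact hq3 (by simpa [List.cons_prefix_cons] using hbh)
        intro habs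
        exact no_bh_g t this (by simpa [List.cons_prefix_cons] using habs)
      · simp only [List.cons_prefix_cons, not_and]
        intro he
        exact absurd he.symm hc
    rw [R3_cons, if_neg h3]
    rw [ih]

-- ===== VERDICT (by name: the statement is the Claim_ definition above) =====
theorem replace_slangs_spec : Claim_equal_replace_slangs := by
  intro text _
  show replace_slangs text = replace_slangs_alt text
  unfold replace_slangs replace_slangs_alt
  rw [scanGo_eq_scan, List.nil_append]
  simp only [PySem.Str.replace]
  rw [replace_eq_R _ _ _ (by decide), replace_eq_R _ _ _ (by decide),
      replace_eq_R _ _ _ (by decide)]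
  simp only [String.toList_ofList]
  exact congrArg String.ofList (three_eq_scan text.toList)
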